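-- pv_equiv track=rewrite | github.com/Wyatt-Cox-student/hash_cipher_project | Cipher.py | get_shift_calculation
-- ===== SOURCE A (Python) =====
-- def get_shift_calculation(message):
--     # Array to hold each letter.
--     Alphabet = ['A', 'B', 'C', 'D', 'E', 'F', 'G', 'H', 'I', 'J', 'K'
--                 , 'L', 'M', 'N', 'O', 'P', 'Q', 'R', 'S'
--                 , 'T', 'U', 'V', 'W', 'X', 'Y', 'Z']
--     len(Alphabet)
--
--     # Maps the posision of each letter.
--     letter_position = {letter: idx + 1 for idx, letter in enumerate(Alphabet)}
--
--     # Count the number of times a letter appears.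
--     letter_amount = {letter: message.count(letter) for letter in set(message)}
--
--     # Calculate the sum of the letters posisions
--     letter_sum = sum(letter_position[letter] * count for letter, count in letter_amount.items())
--
--     # Calculate the shif value
--     shift_amount = (letter_sum - 1) % 25 + 1
--
--     return shift_amount
-- ===== SOURCE B (Python) =====
-- def get_shift_calculation(message):
--     # Position map A->1 ... Z->26; dict lookup so illegal characters raise KeyError.
--     letter_position = {chr(ord('A') + i): i + 1 for i in range(26)}
--     # Single pass: add each character's position directly (no per-letter counting).
--     letter_sum = sum(letter_position[c] for c in message)
--     return (letter_sum - 1) % 25 + 1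
-- ===== Notes on version B (the rewrite author's own statement) =====
-- stated objective: simpler
-- what changed: B drops A's per-letter frequency dictionary (set(message) + message.count per distinct letter, then sum of position*count) and instead sums each character's position in one direct pass over the message; same final (letter_sum - 1) % 25 + 1.
import Mathlib
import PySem

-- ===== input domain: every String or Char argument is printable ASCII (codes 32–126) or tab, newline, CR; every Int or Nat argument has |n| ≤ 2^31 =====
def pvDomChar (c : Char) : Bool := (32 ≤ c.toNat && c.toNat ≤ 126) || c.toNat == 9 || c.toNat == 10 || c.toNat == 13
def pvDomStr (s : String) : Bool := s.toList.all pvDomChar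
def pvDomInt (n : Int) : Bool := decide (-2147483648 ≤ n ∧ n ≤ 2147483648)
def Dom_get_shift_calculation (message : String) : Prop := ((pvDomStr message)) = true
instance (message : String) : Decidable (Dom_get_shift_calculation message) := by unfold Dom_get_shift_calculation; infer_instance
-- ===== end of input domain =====

-- B replaces A's per-letter frequency dictionary (sum of position*count over set(message))
-- by one direct pass summing each character's position; objective: simpler.

-- ===== PORT A =====
-- A's Alphabet literal.
def pvAlphabet : List Char :=
  ['A', 'B', 'C', 'D', 'E', 'F', 'G', 'H', 'I', 'J', 'K',
   'L', 'M', 'N', 'O', 'P', 'Q', 'R', 'S',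
   'T', 'U', 'V', 'W', 'X', 'Y', 'Z']

-- letter_position = {letter: idx + 1 for idx, letter in enumerate(Alphabet)}
def pvLetterPositionA : PySem.Dict Char Int :=
  (PySem.List.enumerate pvAlphabet).foldl
    (fun d p => d.insert p.2 (p.1 + 1)) PySem.Dict.empty

def get_shift_calculation (message : String) : Int :=
  -- letter_amount = {letter: message.count(letter) for letter in set(message)}
  -- (letter is a single character, so message.count(letter) is its character count)
  -- (the sum consumed from it is order-independent, so Set order is exact here)
  let letter_amount : List (Char × Int) :=
    (PySem.Set.ofList message.toList).map
      (fun c => (c, (PySem.List.count message.toList c : Int)))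
  -- letter_position[letter] raises KeyError for letters outside A–Z: excluded by Pre_;
  -- getD … 0 is the total form, used only under Pre_.
  let letter_sum : Int :=
    (letter_amount.map (fun p => pvLetterPositionA.getD p.1 0 * p.2)).sum
  PySem.Int.mod (letter_sum - 1) 25 + 1

-- ===== PORT B =====
-- letter_position = {chr(ord('A') + i): i + 1 for i in range(26)}
def pvLetterPositionB : PySem.Dict Char Int :=
  (PySem.List.pyRange 0 26 1).foldl
    (fun d i => d.insert (Char.ofNat ('A'.toNat + i.toNat)) (i + 1)) PySem.Dict.empty

def get_shift_calculation_alt (message : String) : Int :=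
  -- letter_sum = sum(letter_position[c] for c in message); KeyError excluded by Pre_
  let letter_sum : Int :=
    message.toList.foldl (fun s c => s + pvLetterPositionB.getD c 0) 0
  PySem.Int.mod (letter_sum - 1) 25 + 1

-- ===== PRECONDITION & SPEC =====
-- Pre_ excludes exactly the messages with a character outside A–Z: there both Pythons
-- raise KeyError (A in letter_position[letter], B in letter_position[c]).
def Pre_get_shift_calculation (message : String) : Prop :=
  message.toList.all (fun c => 'A' ≤ c && c ≤ 'Z') = true
instance (message : String) : Decidable (Pre_get_shift_calculation message) := by
  unfold Pre_get_shift_calculation; infer_instance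

def pvWitness_get_shift_calculation : String := "AB"

def Spec_get_shift_calculation (message : String) (out : Int) : Prop := out = get_shift_calculation_alt message
instance (message : String) (out : Int) : Decidable (Spec_get_shift_calculation message out) := by unfold Spec_get_shift_calculation; infer_instance

-- ===== CLAIM (what is proved, stated in full; the proofs are below) =====
def Claim_equal_get_shift_calculation : Prop := ∀ (message : String), Dom_get_shift_calculation message → Pre_get_shift_calculation message → Spec_get_shift_calculation message (get_shift_calculation message)

-- ===== LEMMAS AND PROOFS =====

-- The two comprehensions build the same position dictionary.
theorem letterPosition_eq : pvLetterPositionA = pvLetterPositionB := by decide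

-- Summing an indicator over a duplicate-free list picks out the one hit.
theorem sum_map_ite_mem {f : Char → Int} :
    ∀ (s : List Char) (x : Char), s.Nodup → x ∈ s →
      (s.map (fun c => if c = x then f c else 0)).sum = f x := by
  intro s
  induction s with
  | nil => intro x _ hx; cases hx
  | cons a t ih =>
    intro x hnd hx
    rcases List.nodup_cons.mp hnd with ⟨ha, hndt⟩
    rcases List.mem_cons.mp hx with h | h
    · subst h
      have : (t.map (fun c => if c = x then f c else 0)).sum = 0 := by
        apply List.sum_eq_zero
        intro y hy
        rcases List.mem_map.mp hy with ⟨c, hc, rfl⟩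
        have : ¬ c = x := fun h => ha (h ▸ hc)
        simp [this]
      simp [this]
    · have hax : ¬ a = x := fun he => ha (he ▸ h)
      simp [hax, ih x hndt h]

-- position*count summed over the distinct letters equals position summed over the message.
theorem sum_count_eq_sum_map {f : Char → Int} :
    ∀ (l s : List Char), s.Nodup → (∀ c ∈ l, c ∈ s) →
      (s.map (fun c => f c * (l.count c : Int))).sum = (l.map f).sum := by
  intro l
  induction l with
  | nil => intro s _ _; simp
  | cons x t ih =>
    intro s hnd hsub
    have hx : x ∈ s := hsub x (List.mem_cons_self ..)
    have hsub' : ∀ c ∈ t, c ∈ s := fun c hc => hsub c (List.mem_cons_of_mem _ hc)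
    have hsplit : ∀ c : Char,
        f c * (((x :: t).count c : Nat) : Int)
          = f c * (t.count c : Int) + (if c = x then f c else 0) := by
      intro c
      by_cases h : c = x
      · subst h; simp; ring
      · simp [h]
        left
        exact List.count_cons_of_ne (fun he => h he.symm)
    calc (s.map (fun c => f c * ((x :: t).count c : Int))).sum
        = (s.map (fun c => f c * (t.count c : Int) + (if c = x then f c else 0))).sum := by
          exact congrArg List.sum (List.map_congr_left (fun c _ => hsplit c))
      _ = (s.map (fun c => f c * (t.count c : Int))).sum
            + (s.map (fun c => if c = x then f c else 0)).sum := PySem.List.sum_map_add_int ..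
      _ = (t.map f).sum + f x := by rw [ih s hnd hsub', sum_map_ite_mem s x hnd hx]
      _ = ((x :: t).map f).sum := by simp [add_comm]

-- ===== VERDICT (by name: the statement is the Claim_ definition above) =====
theorem get_shift_calculation_spec : Claim_equal_get_shift_calculation := by
  intro message _ _
  unfold Spec_get_shift_calculation get_shift_calculation get_shift_calculation_alt
  rw [← letterPosition_eq, PySem.List.foldl_add]
  simp only [List.map_map]
  have h := sum_count_eq_sum_map (f := fun c => pvLetterPositionA.getD c 0)
      message.toList (PySem.Set.ofList message.toList)
      (PySem.Set.nodup_ofList _) (fun c hc => (PySem.Set.mem_ofList _ _).mpr hc)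
  simp only [Function.comp_def, PySem.List.count_eq]
  rw [h]
  ring_nf
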